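-- pv_equiv track=rewrite | github.com/RDFLib/geosparql-dggs | _source/dggs_functions.py | region_region_intersection
-- ===== SOURCE A (Python) =====
-- def dggs_cell_overlap(cell_one: str, cell_two: str):
--     """
--     Determines whether two DGGS cells overlap.
--     Where cells are of different resolution, they will have different suid lengths. The zip function truncates the longer
--     to be the same length as the shorter, producing two lists for comparison. If these lists are equal, the cells overlap.
--     :param cell_one: the first DGGS cell
--     :param cell_two: the second DGGS cell
--     :return: True if overlaps
--     """
--     for i, j in zip(cell_one, cell_two):
--         if i != j:
--             return False
--     return True
--
-- def dggs_cell_region_overlap(cell: str, region: list):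
--     """
--     Determine whether a cell overlaps with any cell in a list of cells
--     :param cell: a DGGS cell
--     :param region: a list of DGGS cells
--     :return: True if any overlapping cells
--     """
--     for component_cell in region:
--         if dggs_cell_overlap(cell, component_cell):
--             return True
--     return False
--
-- def region_region_intersection(region_one: list, region_two: list):
--     """
--     Determines whether two DGGS suid overlap.
--     Where suid are of different resolution, they will have different suid lengths. The zip function truncates the longer
--     to be the same length as the shorter, producing two lists for comparison. If these lists are equal, the suid overlap.
--     :param return_relationships: whether to return a dictionary of relationships between
--     :param cell_one: the first DGGS cell
--     :param cell_two: the second DGGS cell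
--     :return: True if overlaps
--     """
--     if isinstance(region_one, str):
--         region_one = [region_one]
--     if isinstance(region_two, str):
--         region_two = [region_two]
--     for cell_one in region_one:
--         if dggs_cell_region_overlap(cell_one, region_two):
--             return True
--     return False
-- ===== SOURCE B (Python) =====
-- def region_region_intersection(region_one: list, region_two: list):
--     if isinstance(region_one, str):
--         region_one = [region_one]
--     if isinstance(region_two, str):
--         region_two = [region_two]
--     cells = set(region_two)
--     prefixes = {cell[:k] for cell in region_two for k in range(len(cell) + 1)}
--     for c in region_one:
--         if c in prefixes or any(c[:k] in cells for k in range(len(c) + 1)):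
--             return True
--     return False
-- ===== Notes on version B (the rewrite author's own statement) =====
-- stated objective: alternative
-- what changed: Replaces the nested scan comparing every region_one cell against every region_two cell character-by-character with two hash sets (region_two cells and all their prefixes) built once, so each region_one cell is tested by O(L) set lookups instead of an inner scan; on the random timing inputs A short-circuits early, so B is not measurably faster there.
import Mathlib
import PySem

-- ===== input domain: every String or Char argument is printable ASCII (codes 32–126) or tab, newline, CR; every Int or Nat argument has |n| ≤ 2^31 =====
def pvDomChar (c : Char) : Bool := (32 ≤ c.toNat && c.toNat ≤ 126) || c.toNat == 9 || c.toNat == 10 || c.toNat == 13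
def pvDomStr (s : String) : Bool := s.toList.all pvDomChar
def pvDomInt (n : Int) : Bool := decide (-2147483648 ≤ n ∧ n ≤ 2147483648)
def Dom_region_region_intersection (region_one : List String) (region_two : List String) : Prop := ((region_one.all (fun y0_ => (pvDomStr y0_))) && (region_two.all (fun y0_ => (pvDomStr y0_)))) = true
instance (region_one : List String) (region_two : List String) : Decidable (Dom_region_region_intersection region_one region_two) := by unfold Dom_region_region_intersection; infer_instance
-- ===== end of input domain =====

-- B replaces A's nested all-pairs character scan with two hash sets (region_two
-- cells and all their prefixes) built once; objective: alternative algorithm.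

-- ===== PORT A =====
-- for i, j in zip(cell_one, cell_two): if i != j: return False; return True
def dggs_cell_overlap : List Char → List Char → Bool
  | i :: t1, j :: t2 => if i ≠ j then false else dggs_cell_overlap t1 t2
  | _, _ => true

-- for component_cell in region: if dggs_cell_overlap(cell, component_cell): return True
def dggs_cell_region_overlap (cell : String) (region : List String) : Bool :=
  region.any fun component_cell => dggs_cell_overlap cell.toList component_cell.toList

-- the isinstance(…, str) branches are vacuous under the List String typing
def region_region_intersection (region_one : List String) (region_two : List String) : Bool :=
  region_one.any fun cell_one => dggs_cell_region_overlap cell_one region_two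

-- ===== PORT B =====
def region_region_intersection_alt (region_one : List String) (region_two : List String) : Bool :=
  let cells : PySem.Set (List Char) := PySem.Set.ofList (region_two.map String.toList)
  let prefixes : PySem.Set (List Char) :=
    PySem.Set.ofList (region_two.flatMap fun cell =>
      (List.range (cell.toList.length + 1)).map fun k => cell.toList.take k)
  region_one.any fun c =>
    prefixes.contains c.toList ||
      (List.range (c.toList.length + 1)).any fun k => cells.contains (c.toList.take k)

-- ===== PRECONDITION & SPEC =====
def Spec_region_region_intersection (region_one : List String) (region_two : List String) (out : Bool) : Prop := out = region_region_intersection_alt region_one region_two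
instance (region_one : List String) (region_two : List String) (out : Bool) : Decidable (Spec_region_region_intersection region_one region_two out) := by unfold Spec_region_region_intersection; infer_instance

-- ===== CLAIM (what is proved, stated in full; the proofs are below) =====
def Claim_equal_region_region_intersection : Prop := ∀ (region_one : List String) (region_two : List String), Dom_region_region_intersection region_one region_two → Spec_region_region_intersection region_one region_two (region_region_intersection region_one region_two)

-- ===== LEMMAS AND PROOFS =====

-- A's zip-equality test holds exactly when one cell is a prefix of the other
theorem overlap_iff_prefix (a b : List Char) :
    dggs_cell_overlap a b = true ↔ (a <+: b ∨ b <+: a) := by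
  induction a generalizing b with
  | nil => simp [dggs_cell_overlap]
  | cons i t1 ih =>
    cases b with
    | nil => simp [dggs_cell_overlap]
    | cons j t2 =>
      by_cases h : i = j
      · subst h
        simp [dggs_cell_overlap, ih, List.cons_prefix_cons]
      · have hov : dggs_cell_overlap (i :: t1) (j :: t2) = false := by
          simp [dggs_cell_overlap, h]
        rw [hov]
        simp only [Bool.false_eq_true, false_iff]
        rintro (h1 | h1)
        · exact h (List.cons_prefix_cons.mp h1).1
        · exact h ((List.cons_prefix_cons.mp h1).1).symm

theorem prefix_iff_take (x y : List Char) :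
    x <+: y ↔ ∃ k < y.length + 1, x = y.take k := by
  constructor
  · intro h
    exact ⟨x.length, by have := h.length_le; omega, (List.prefix_iff_eq_take.mp h)⟩
  · rintro ⟨k, _, rfl⟩
    exact List.take_prefix k y

theorem inner_eq (c : String) (r2 : List String) :
    (PySem.Set.contains
        (PySem.Set.ofList (r2.flatMap fun cell =>
          (List.range (cell.toList.length + 1)).map fun k => cell.toList.take k)) c.toList ||
      (List.range (c.toList.length + 1)).any fun k =>
        PySem.Set.contains (PySem.Set.ofList (r2.map String.toList)) (c.toList.take k)) =
    dggs_cell_region_overlap c r2 := by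
  rw [Bool.eq_iff_iff]
  simp only [Bool.or_eq_true, PySem.Set.contains_iff, PySem.Set.mem_ofList,
    dggs_cell_region_overlap, List.any_eq_true, List.mem_flatMap, List.mem_map,
    List.mem_range, overlap_iff_prefix]
  constructor
  · rintro (⟨r, hr, k, hk, hkeq⟩ | ⟨k, hk, r, hr, hkeq⟩)
    · exact ⟨r, hr, Or.inl ((prefix_iff_take _ _).mpr ⟨k, hk, hkeq.symm⟩)⟩
    · exact ⟨r, hr, Or.inr (by rw [hkeq]; exact List.take_prefix k c.toList)⟩
  · rintro ⟨r, hr, hp | hp⟩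
    · obtain ⟨k, hk, hkeq⟩ := (prefix_iff_take _ _).mp hp
      exact Or.inl ⟨r, hr, k, hk, hkeq.symm⟩
    · obtain ⟨k, hk, hkeq⟩ := (prefix_iff_take _ _).mp hp
      exact Or.inr ⟨k, hk, r, hr, hkeq⟩

-- ===== VERDICT (by name: the statement is the Claim_ definition above) =====
theorem region_region_intersection_spec : Claim_equal_region_region_intersection := by
  intro r1 r2 _
  unfold Spec_region_region_intersection region_region_intersection region_region_intersection_alt
  simp only [inner_eq]
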